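-- pv_equiv track=rewrite | github.com/Fanka2005/Locomotion_Commotion | assignment1.py | total_station_time
-- ===== SOURCE A (Python) =====
-- def total_station_time(stations: list[tuple], friendStart: int)->list[tuple]:
--     """
-- 		Function description: This function calculate the amount of time it tooks to travel from the source station/element to each station/element and back to itself.
-- 		Approach description: This function create dist_time list and then iterate over each station/element in input list/stations to find the index of the source station,
--                                 after that, create a new list by slicing the input list/stations from the source index to the end and from the front to the source index, then concatenate them together.
--                                 next it iterate the new list while updating the time (It increment the time in every iteration by the time value in every station)
--                                 and then append the tuple containing (station, updated distance time from the source station) to the dist_time list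
--
-- 		Input:
--             stations(list[tuple]) : An array based list of train stations where each station is represented as a tuple (lTS, t) where:
--                                     - lTS is a train station,
--                                     - t is the time in minutes to travel from lTS to the next train station in the train loop,
--
--             friendStart(int) : is the train station ID from where your friend starts their journey
--
-- 		Output: An array based list containing tuple list[tuple], which the tuple contains (station, the distance to each stations/element from the source station/element)
--
-- 		Time complexity: O(|T|), where |T| is the number of station/element in input list/stations
--
-- 		Time complexity analysis : Given |T| is the number of station/element in input list/stations,
--
-- 			The function iterate every item in the input list/stations and perform a constant operation for every iteration (unpack tuple, apending and incrementing).
--             This function created some empty list and then iterate over all item in the input list and append a tuple (station, the time it takes) in each iteration.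
--                                     It increment the time in every iteration by the time value in every station, thus it only takes O(T) time where |T| is the number
--                                     of element/station in the input list/stations.
--                                     O(|T|) : Iterate the stations/input list to find the source index
--                                     O(|T|) : Calculate the amount of time it tooks to travel from the source station to each station, by incrementing and appending to the dist_time list as you go
--                                     therefore : O(|T|+|T|) = O(|T|)
--
-- 		Space complexity: O(|T|),  where |T| is the number of station/element in input list/stations.
--
-- 		Space complexity analysis: This function created some empty list and then iterate over all item in the input list and append a tuple (station, the time it takes) in each iteration.
--                                     It increment the time in every iteration by the time value in every station, thus it only takes O(T) space where |T| is the number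
--                                     of element/station in the input list/stations.
--                                     O(|T|) : input list (stations)
--                                     O(|T|) : the new created list by slicing, total
--                                     O(|T|) : the new created list (dist_time)
--                                     therefore : O(|T|+|T|+|T|) = O(|T|)
--
-- 	"""
--
--     #Find the source index
--     #Time and space : O(T), where T is number of train stations
--     for index, station in enumerate(stations):
--         if station[0] == friendStart:
--             source_index = index
--
--     dist_time=[]
--     #Calculate the amount of time it tooks to travel from the source station to each station, by incrementing and appending to the dist_time list as you go
--     #Time and space : O(T), where T is number of train stations
--     counter = 0
--     for index, station in enumerate(stations[source_index:]+stations[:source_index]):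
--         dist_time.append((station[0], counter))
--         counter += station[1]
--
--     #Update the time it took to loop back
--     #Time and space : O(1)
--     dist_time[0] = (dist_time[0][0], counter)
--
--     return dist_time
-- ===== SOURCE B (Python) =====
-- def total_station_time(stations: list[tuple], friendStart: int) -> list[tuple]:
--     # Prefix-sum table + modular rotation indexing instead of slicing + running accumulator.
--     src = None
--     for i, st in enumerate(stations):
--         if st[0] == friendStart:
--             src = i
--     n = len(stations)
--     prefix = [0]
--     run = 0
--     for _, t in stations:
--         run += t
--         prefix.append(run)
--     total = prefix[n]
--     result = []
--     for i in range(n):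
--         j = (src + i) % n
--         if i == 0:
--             off = total
--         elif j >= src:
--             off = prefix[j] - prefix[src]
--         else:
--             off = total - prefix[src] + prefix[j]
--         result.append((stations[j][0], off))
--     return result
-- ===== Notes on version B (the rewrite author's own statement) =====
-- stated objective: alternative
-- what changed: B replaces A's rotated-list construction (slice concatenation + running accumulator with a head patch) by a prefix-sum table over the original list and one pass in rotation order via modular indexing, computing each offset by table lookup.
import Mathlib
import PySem

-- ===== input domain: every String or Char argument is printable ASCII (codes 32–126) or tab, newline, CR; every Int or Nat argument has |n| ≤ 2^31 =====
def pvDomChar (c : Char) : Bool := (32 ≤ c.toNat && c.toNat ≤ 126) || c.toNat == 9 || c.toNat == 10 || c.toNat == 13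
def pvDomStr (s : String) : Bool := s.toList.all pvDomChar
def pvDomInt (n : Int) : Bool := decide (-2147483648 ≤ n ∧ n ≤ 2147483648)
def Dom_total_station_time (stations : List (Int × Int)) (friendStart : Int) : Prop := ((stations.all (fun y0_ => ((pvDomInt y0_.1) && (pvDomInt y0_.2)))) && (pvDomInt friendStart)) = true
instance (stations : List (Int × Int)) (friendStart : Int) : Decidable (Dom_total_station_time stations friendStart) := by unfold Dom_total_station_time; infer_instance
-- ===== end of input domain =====

-- B computes the same rotation of travel times via a prefix-sum table and modular
-- indexing instead of A's slice-concatenated list with a running accumulator.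


-- ===== PORT A =====
def total_station_time (stations : List (Int × Int)) (friendStart : Int) : List (Int × Int) :=
  -- for index, station in enumerate(stations): if station[0] == friendStart: source_index = index
  let src? := (PySem.List.enumerate stations).foldl
      (fun (acc : Option Int) p => if p.2.1 == friendStart then some p.1 else acc) none
  match src? with
  | none => []  -- Python raises UnboundLocalError here; excluded by Pre_
  | some src =>
    let srcN := src.toNat  -- src is a nonnegative in-range index, so the slices are drop/take
    let rotated := stations.drop srcN ++ stations.take srcN  -- stations[source_index:] + stations[:source_index]
    -- loop appending (station[0], counter) and incrementing counter
    let st := rotated.foldl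
      (fun (st : List (Int × Int) × Int) p => (st.1 ++ [(p.1, st.2)], st.2 + p.2)) ([], 0)
    match st.1 with
    | [] => []  -- dist_time[0] would raise IndexError; unreachable when src? = some
    | (s0, _) :: rest => (s0, st.2) :: rest  -- dist_time[0] = (dist_time[0][0], counter)

-- ===== PORT B =====
def total_station_time_alt (stations : List (Int × Int)) (friendStart : Int) : List (Int × Int) :=
  -- same source scan as A (keep the LAST matching index)
  let src? := (PySem.List.enumerate stations).foldl
      (fun (acc : Option Int) p => if p.2.1 == friendStart then some p.1 else acc) none
  let n := stations.length
  match src? with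
  | none =>
    -- src is None: if n = 0 the output loop is empty and Python returns []; otherwise
    -- Python raises TypeError on (src + i); both cases are excluded by Pre_
    []
  | some src =>
    let srcN := src.toNat  -- src is a nonnegative in-range index
    -- prefix = [0]; run = 0; for _, t in stations: run += t; prefix.append(run)
    let pr := (stations.foldl
      (fun (st : List Int × Int) p => (st.1 ++ [st.2 + p.2], st.2 + p.2)) ([0], 0)).1
    let total := pr.getD n 0
    -- for i in range(n): j = (src+i) % n; append (stations[j][0], offset-by-table-lookup)
    (List.range n).foldl (fun acc i =>
      let j := (srcN + i) % n
      let off := if i = 0 then total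
                 else if srcN ≤ j then pr.getD j 0 - pr.getD srcN 0
                 else total - pr.getD srcN 0 + pr.getD j 0
      acc ++ [((stations.getD j (0, 0)).1, off)]) []

-- ===== PRECONDITION & SPEC =====
-- Pre_ excludes exactly the inputs where A raises UnboundLocalError: no station id equals friendStart.
def Pre_total_station_time (stations : List (Int × Int)) (friendStart : Int) : Prop :=
  ∃ p ∈ stations, p.1 = friendStart
instance (stations : List (Int × Int)) (friendStart : Int) : Decidable (Pre_total_station_time stations friendStart) := by unfold Pre_total_station_time; infer_instance
def pvWitness_total_station_time : (List (Int × Int)) × Int := ([(1, 5), (2, 3)], 1)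

def Spec_total_station_time (stations : List (Int × Int)) (friendStart : Int) (out : List (Int × Int)) : Prop := out = total_station_time_alt stations friendStart
instance (stations : List (Int × Int)) (friendStart : Int) (out : List (Int × Int)) : Decidable (Spec_total_station_time stations friendStart out) := by unfold Spec_total_station_time; infer_instance

-- ===== CLAIM (what is proved, stated in full; the proofs are below) =====
def Claim_equal_total_station_time : Prop := ∀ (stations : List (Int × Int)) (friendStart : Int), Dom_total_station_time stations friendStart → Pre_total_station_time stations friendStart → Spec_total_station_time stations friendStart (total_station_time stations friendStart)

-- ===== LEMMAS AND PROOFS =====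

/-- Sum of the travel-time components. -/
def sumT (xs : List (Int × Int)) : Int := (xs.map Prod.snd).sum

/-- Spine of A's accumulator loop: pairs (id, running sum so far). -/
def distList : List (Int × Int) → Int → List (Int × Int)
  | [], _ => []
  | p :: tl, c => (p.1, c) :: distList tl (c + p.2)

/-- Spine of B's prefix loop: partial sums after each element. -/
def prefList : List (Int × Int) → Int → List Int
  | [], _ => []
  | p :: tl, c => (c + p.2) :: prefList tl (c + p.2)

theorem foldA_eq (xs : List (Int × Int)) : ∀ (acc : List (Int × Int)) (c : Int),
    xs.foldl (fun (st : List (Int × Int) × Int) p => (st.1 ++ [(p.1, st.2)], st.2 + p.2)) (acc, c)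
      = (acc ++ distList xs c, c + sumT xs) := by
  induction xs with
  | nil => intro acc c; simp [distList, sumT]
  | cons p tl ih =>
    intro acc c
    simp only [List.foldl_cons, ih, distList, sumT, List.map_cons, List.sum_cons]
    rw [Prod.mk.injEq]
    exact ⟨by simp, by ring⟩

theorem foldB_eq (xs : List (Int × Int)) : ∀ (acc : List Int) (c : Int),
    xs.foldl (fun (st : List Int × Int) p => (st.1 ++ [st.2 + p.2], st.2 + p.2)) (acc, c)
      = (acc ++ prefList xs c, c + sumT xs) := by
  induction xs with
  | nil => intro acc c; simp [prefList, sumT]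
  | cons p tl ih =>
    intro acc c
    simp only [List.foldl_cons, ih, prefList, sumT, List.map_cons, List.sum_cons]
    rw [Prod.mk.injEq]
    exact ⟨by simp, by ring⟩

theorem length_distList (xs : List (Int × Int)) : ∀ c, (distList xs c).length = xs.length := by
  induction xs with
  | nil => intro c; simp [distList]
  | cons p tl ih => intro c; simp [distList, ih]

theorem getD_distList (xs : List (Int × Int)) : ∀ (c : Int) (i : Nat), i < xs.length →
    (distList xs c).getD i (0, 0) = ((xs.getD i (0, 0)).1, c + sumT (xs.take i)) := by
  induction xs with
  | nil => intro c i h; simp at h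
  | cons p tl ih =>
    intro c i h
    cases i with
    | zero => simp [distList, sumT]
    | succ k =>
      simp only [distList, List.getD_cons_succ, List.take_succ_cons]
      rw [ih (c + p.2) k (by simpa using h)]
      simp only [sumT, List.map_cons, List.sum_cons]
      rw [Prod.mk.injEq]
      exact ⟨rfl, by ring⟩

theorem getD_prefList (xs : List (Int × Int)) : ∀ (c : Int) (k : Nat), k ≤ xs.length →
    (c :: prefList xs c).getD k 0 = c + sumT (xs.take k) := by
  induction xs with
  | nil =>
    intro c k h
    have hk0 : k = 0 := Nat.le_zero.mp h
    subst hk0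
    simp [sumT]
  | cons p tl ih =>
    intro c k h
    cases k with
    | zero => simp [sumT]
    | succ m =>
      simp only [prefList, List.getD_cons_succ, List.take_succ_cons]
      rw [ih (c + p.2) m (by simpa using h)]
      simp only [sumT, List.map_cons, List.sum_cons]
      ring

theorem sumT_append (xs ys : List (Int × Int)) : sumT (xs ++ ys) = sumT xs + sumT ys := by
  simp [sumT]

/-- The source-finding fold, shared verbatim by both ports. -/
def srcFold (stations : List (Int × Int)) (friendStart : Int) : Option Int :=
  (PySem.List.enumerate stations).foldl
    (fun (acc : Option Int) p => if p.2.1 == friendStart then some p.1 else acc) none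

theorem srcFold_keeps_some (l : List (Int × (Int × Int))) (fs : Int) :
    ∀ (a : Option Int), a.isSome →
    (l.foldl (fun (acc : Option Int) p => if p.2.1 == fs then some p.1 else acc) a).isSome := by
  induction l with
  | nil => intro a h; simpa using h
  | cons p tl ih =>
    intro a h
    simp only [List.foldl_cons]
    split
    · exact ih _ rfl
    · exact ih _ h

theorem srcFold_some_of_mem (l : List (Int × (Int × Int))) (fs : Int) :
    ∀ (a : Option Int), (∃ p ∈ l, p.2.1 = fs) →
    (l.foldl (fun (acc : Option Int) p => if p.2.1 == fs then some p.1 else acc) a).isSome := by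
  induction l with
  | nil => intro a h; simp at h
  | cons p tl ih =>
    intro a h
    simp only [List.foldl_cons]
    obtain ⟨q, hq, hqfs⟩ := h
    rcases List.mem_cons.mp hq with rfl | hmem
    · rw [if_pos (by simpa using hqfs)]
      exact srcFold_keeps_some tl fs _ rfl
    · split
      · exact srcFold_keeps_some tl fs _ rfl
      · exact ih _ ⟨q, hmem, hqfs⟩

theorem srcFold_range (l : List (Int × (Int × Int))) (fs : Int) :
    ∀ (a : Option Int) (src : Int),
    l.foldl (fun (acc : Option Int) p => if p.2.1 == fs then some p.1 else acc) a = some src →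
    a = some src ∨ ∃ p ∈ l, p.1 = src := by
  induction l with
  | nil => intro a src h; left; simpa using h
  | cons p tl ih =>
    intro a src h
    simp only [List.foldl_cons] at h
    by_cases hp : (p.2.1 == fs) = true
    · rw [if_pos hp] at h
      rcases ih _ _ h with h1 | ⟨q, hq, hqs⟩
      · right; exact ⟨p, List.mem_cons_self, (Option.some.inj h1)⟩
      · right; exact ⟨q, List.mem_cons_of_mem _ hq, hqs⟩
    · rw [if_neg hp] at h
      rcases ih _ _ h with h1 | ⟨q, hq, hqs⟩
      · left; exact h1
      · right; exact ⟨q, List.mem_cons_of_mem _ hq, hqs⟩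

theorem srcFold_bounds (stations : List (Int × Int)) (fs : Int) (src : Int)
    (h : srcFold stations fs = some src) : 0 ≤ src ∧ src.toNat < stations.length := by
  rcases srcFold_range _ fs none src h with h1 | ⟨p, hp, hps⟩
  · simp at h1
  · obtain ⟨k, hk, rfl⟩ := (PySem.List.mem_enumerate_iff _ _ _).mp hp
    subst hps
    simp only [zero_add]
    omega

-- ===== MAIN PROOF =====

theorem main_eq (stations : List (Int × Int)) (friendStart : Int)
    (hpre : Pre_total_station_time stations friendStart) :
    total_station_time stations friendStart = total_station_time_alt stations friendStart := by
  obtain ⟨q, hq, hqfs⟩ := hpre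
  -- the shared source fold yields some src
  have hsome : (srcFold stations friendStart).isSome := by
    apply srcFold_some_of_mem
    obtain ⟨k, hk, rfl⟩ := List.mem_iff_getElem.mp hq
    exact ⟨(0 + k, stations[k]), (PySem.List.mem_enumerate_iff _ _ _).mpr ⟨k, hk, rfl⟩, hqfs⟩
  obtain ⟨src, hsrc⟩ := Option.isSome_iff_exists.mp hsome
  obtain ⟨hsrc0, hsrclt⟩ := srcFold_bounds stations friendStart src hsrc
  set n := stations.length with hn
  set s := src.toNat with hs
  have hsn : s < n := hsrclt
  have hnpos : 0 < n := Nat.lt_of_le_of_lt (Nat.zero_le _) hsn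
  -- evaluate both ports
  unfold total_station_time total_station_time_alt
  rw [show (PySem.List.enumerate stations).foldl
      (fun (acc : Option Int) p => if p.2.1 == friendStart then some p.1 else acc) none
      = some src from hsrc]
  simp only
  set rot := stations.drop s ++ stations.take s with hrot
  have hrotlen : rot.length = n := by simp [hrot, hn]; omega
  have hrotsum : sumT rot = sumT stations := by
    rw [hrot, sumT_append]
    conv_rhs => rw [← List.take_append_drop s stations]
    rw [sumT_append]; ring
  -- A side
  rw [foldA_eq rot [] 0]
  simp only [List.nil_append, zero_add]
  -- B side: prefix table
  rw [foldB_eq stations [0] 0]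
  simp only
  have hpr : ∀ k : Nat, k ≤ n → ([(0 : Int)] ++ prefList stations 0).getD k 0 = sumT (stations.take k) := by
    intro k hk
    have := getD_prefList stations 0 k (by omega)
    simpa using this
  have htot : ([(0 : Int)] ++ prefList stations 0).getD n 0 = sumT stations := by
    rw [hpr n le_rfl, List.take_of_length_le (le_of_eq hn.symm)]
  -- offset of rotation position i, as a take-sum of rot
  have hrotget : ∀ i : Nat, i < n → rot.getD i (0, 0) = stations.getD ((s + i) % n) (0, 0) := by
    intro i hi
    by_cases hcase : i < n - s
    · have hmod : (s + i) % n = s + i := Nat.mod_eq_of_lt (by omega)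
      rw [hmod, hrot]
      rw [List.getD_eq_getElem?_getD, List.getD_eq_getElem?_getD,
        List.getElem?_append_left (by simp [hn]; omega)]
      simp [hn]
    · have hmod : (s + i) % n = i - (n - s) := by
        have h1 : s + i = n + (i - (n - s)) := by omega
        rw [h1, Nat.add_mod_left, Nat.mod_eq_of_lt (by omega)]
      rw [hmod, hrot]
      rw [List.getD_eq_getElem?_getD, List.getD_eq_getElem?_getD,
        List.getElem?_append_right (by simp [hn]; omega)]
      have hlt : i - (n - s) < s := by omega
      rw [List.getElem?_take_of_lt (by simp [hn]; omega)]
      congr 1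
      rw [List.length_drop]
  have hrottake : ∀ i : Nat, i < n →
      sumT (rot.take i) =
        (if s ≤ (s + i) % n then sumT (stations.take ((s + i) % n)) - sumT (stations.take s)
         else sumT stations - sumT (stations.take s) + sumT (stations.take ((s + i) % n))) := by
    intro i hi
    by_cases hcase : i ≤ n - s
    · have hdt : rot.take i = (stations.drop s).take i := by
        rw [hrot, List.take_append_of_le_length (by simp [hn]; omega)]
      by_cases hzero : s + i = n
      · -- j = 0; take i of drop s is the whole drop
        have hj : (s + i) % n = 0 := by rw [hzero, Nat.mod_self]
        rw [hj]
        have : rot.take i = stations.drop s := by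
          rw [hdt, List.take_of_length_le (by simp [hn]; omega)]
        rw [this]
        have hsplit : sumT stations = sumT (stations.take s) + sumT (stations.drop s) := by
          conv_lhs => rw [← List.take_append_drop s stations]
          rw [sumT_append]
        have hspos : 0 < s := by omega
        rw [if_neg (by omega)]
        simp only [List.take_zero]
        have h0 : sumT ([] : List (Int × Int)) = 0 := rfl
        rw [h0]
        omega
      · have hj : (s + i) % n = s + i := Nat.mod_eq_of_lt (by omega)
        rw [hj, if_pos (by omega)]
        have hsplit : stations.take (s + i) = stations.take s ++ (stations.drop s).take i := by
          rw [← List.take_add]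
        rw [hsplit, sumT_append, hdt]
        ring
    · have hj : (s + i) % n = i - (n - s) := by
        have h1 : s + i = n + (i - (n - s)) := by omega
        rw [h1, Nat.add_mod_left, Nat.mod_eq_of_lt (by omega)]
      rw [hj, if_neg (by omega)]
      have hti : rot.take i = stations.drop s ++ (stations.take s).take (i - (n - s)) := by
        rw [hrot, List.take_append]
        congr 2
        · exact List.take_of_length_le (by rw [List.length_drop]; omega)
        · rw [List.length_drop]
      rw [hti, sumT_append]
      have htt : (stations.take s).take (i - (n - s)) = stations.take (i - (n - s)) := by
        rw [List.take_take]
        congr 1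
        omega
      have hsplit : sumT stations = sumT (stations.take s) + sumT (stations.drop s) := by
        conv_lhs => rw [← List.take_append_drop s stations]
        rw [sumT_append]
      rw [htt]
      omega
  -- B's foldl-with-append is a map over range
  rw [PySem.List.foldl_append_eq_flatMap]
  have hflat : ∀ (g : Nat → Int × Int), (List.range n).flatMap (fun i => [g i]) = (List.range n).map g := by
    intro g
    induction n with
    | zero => simp
    | succ m ihm => simp [List.range_succ, ihm]
  rw [hflat]
  -- both sides elementwise
  have hAlen : (distList rot 0).length = n := by rw [length_distList, hrotlen]
  have hAne : distList rot 0 ≠ [] := by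
    intro hcontra
    rw [← List.length_eq_zero_iff] at hcontra
    omega
  obtain ⟨hd, tl, hdl⟩ : ∃ hd tl, distList rot 0 = hd :: tl := by
    cases hdcases : distList rot 0 with
    | nil => exact absurd hdcases hAne
    | cons a b => exact ⟨a, b, rfl⟩
  obtain ⟨s0, t0⟩ := hd
  rw [hdl] at hAlen
  simp only [List.length_cons] at hAlen
  rw [hdl]
  -- final list equality by extensionality
  apply List.ext_getElem
  · simp only [List.nil_append, List.length_cons, List.length_map, List.length_range]
    omega
  · intro i hi1 hi2
    have hin : i < n := by simpa using hi2
    have hLHS : ((s0, sumT rot) :: tl)[i]'(by simpa using hi1)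
        = ((rot.getD i (0,0)).1, if i = 0 then sumT rot else sumT (rot.take i)) := by
      cases i with
      | zero =>
        have h0 := getD_distList rot 0 0 (by omega)
        rw [hdl] at h0
        simp only [List.getD_cons_zero] at h0
        have hfst : s0 = (rot.getD 0 (0,0)).1 := by
          have := congrArg Prod.fst h0
          simpa using this
        simp [hfst]
      | succ k =>
        have hk := getD_distList rot 0 (k + 1) (by omega)
        rw [hdl] at hk
        simp only [List.getD_cons_succ] at hk
        have hklen : k < tl.length := by omega
        simp only [List.getElem_cons_succ, if_neg (Nat.succ_ne_zero k)]
        rw [← List.getD_eq_getElem _ (0,0) hklen]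
        rw [hk]
        simp
    simp only [List.nil_append, List.getElem_map, List.getElem_range]
    rw [hLHS]
    rw [show src.toNat = s from hs.symm, show stations.length = n from hn.symm]
    have hjlt : (s + i) % n < n := Nat.mod_lt _ hnpos
    rw [hrotget i hin]
    by_cases hi0 : i = 0
    · subst hi0
      rw [if_pos rfl, if_pos rfl, Prod.mk.injEq]
      exact ⟨rfl, by rw [hrotsum, htot]⟩
    · rw [if_neg hi0, if_neg hi0, hrottake i hin,
        hpr _ (le_of_lt hjlt), hpr s (le_of_lt hsn), htot]

-- ===== VERDICT (by name: the statement is the Claim_ definition above) =====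
theorem total_station_time_spec : Claim_equal_total_station_time := by
  intro stations friendStart _ hpre
  unfold Spec_total_station_time
  exact main_eq stations friendStart hpre
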